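-- pv_equiv track=rewrite | github.com/alphasingh/competitive-programming | leetcode/medium/global_local_inversions.py | isIdealPermutation_brute
-- ===== SOURCE A (Python) =====
-- def isIdealPermutation_brute(A: [int]) -> bool:
--     local_inversions = global_inversions = 0
--     size = len(A)
--     for i in range(size):
--         for j in range(i + 1, size):
--             if A[i] > A[j]:
--                 global_inversions += 1
--     for i in range(size - 1):
--         if A[i] > A[i + 1]:
--             local_inversions += 1
--     return local_inversions == global_inversions
-- ===== SOURCE B (Python) =====
-- def isIdealPermutation_brute(A: [int]) -> bool:
--     # O(n): inversions are all local iff no element exceeds one at least two places later;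
--     # track the running max of everything before position i-1 and compare with A[i].
--     mx = None
--     for v, w in zip(A, A[2:]):
--         if mx is None or v > mx:
--             mx = v
--         if mx > w:
--             return False
--     return True
-- ===== Notes on version B (the rewrite author's own statement) =====
-- stated objective: faster
-- what changed: Replaced the O(n^2) pair-counting of global vs local inversions by a single O(n) pass that keeps the running maximum of A[0..i-2] and returns False as soon as it exceeds A[i] (equal counts iff no non-adjacent inversion exists).
import Mathlib
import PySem

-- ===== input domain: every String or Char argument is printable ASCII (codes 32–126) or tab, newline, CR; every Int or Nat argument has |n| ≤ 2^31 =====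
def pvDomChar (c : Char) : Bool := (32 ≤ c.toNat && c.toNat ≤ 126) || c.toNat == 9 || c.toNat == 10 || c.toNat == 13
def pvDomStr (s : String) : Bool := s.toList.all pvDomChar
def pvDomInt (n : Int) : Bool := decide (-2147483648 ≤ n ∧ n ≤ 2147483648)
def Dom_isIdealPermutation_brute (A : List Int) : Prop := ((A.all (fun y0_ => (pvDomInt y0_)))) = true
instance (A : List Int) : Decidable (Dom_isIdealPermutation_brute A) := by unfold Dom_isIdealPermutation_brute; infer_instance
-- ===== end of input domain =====

-- B replaces A's O(n^2) pair-counting by one O(n) pass with a running maximum (equal counts iff no non-adjacent inversion).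

-- ===== PORT A =====
-- literal transliteration: count all inversions, count adjacent inversions, compare the counts
def isIdealPermutation_brute (A : List Int) : Bool :=
  let size : Int := A.length
  let globalInv : Int :=
    (PySem.List.pyRange 0 size 1).foldl (fun g i =>
      (PySem.List.pyRange (i + 1) size 1).foldl (fun g j =>
        if PySem.List.pyGetD A i 0 > PySem.List.pyGetD A j 0 then g + 1 else g) g) 0
  let localInv : Int :=
    (PySem.List.pyRange 0 (size - 1) 1).foldl (fun l i =>
      if PySem.List.pyGetD A i 0 > PySem.List.pyGetD A (i + 1) 0 then l + 1 else l) 0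
  localInv == globalInv

-- ===== PORT B =====
-- loop body of Source B over zip(A, A[2:]): state mx, early False as soon as mx > A[i]
def pvAltGo (mx : Option Int) : List (Int × Int) → Bool
  | [] => true
  | (v, w) :: rest =>
    let m : Int := match mx with | none => v | some m0 => if v > m0 then v else m0
    if m > w then false else pvAltGo (some m) rest

def isIdealPermutation_brute_alt (A : List Int) : Bool :=
  pvAltGo none (A.zip (PySem.List.slice A (some 2) none))

-- ===== PRECONDITION & SPEC =====
def Spec_isIdealPermutation_brute (A : List Int) (out : Bool) : Prop := out = isIdealPermutation_brute_alt A
instance (A : List Int) (out : Bool) : Decidable (Spec_isIdealPermutation_brute A out) := by unfold Spec_isIdealPermutation_brute; infer_instance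

-- ===== CLAIM (what is proved, stated in full; the proofs are below) =====
def Claim_equal_isIdealPermutation_brute : Prop := ∀ (A : List Int), Dom_isIdealPermutation_brute A → Spec_isIdealPermutation_brute A (isIdealPermutation_brute A)

-- ===== LEMMAS AND PROOFS =====

-- the common characterisation both programs decide: no inversion at distance ≥ 2
def pvNoFar (A : List Int) : Prop :=
  ∀ j < A.length, ∀ i < A.length, i + 2 ≤ j → A.getD i 0 ≤ A.getD j 0

lemma pv_sum_nonneg_zero_iff (l : List Int) (h : ∀ x ∈ l, 0 ≤ x) :
    l.sum = 0 ↔ ∀ x ∈ l, x = 0 := by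
  induction l with
  | nil => simp
  | cons a t ih =>
    have ha := h a (by simp)
    have ht : ∀ x ∈ t, 0 ≤ x := fun x hx => h x (by simp [hx])
    have hts : 0 ≤ t.sum := List.sum_nonneg ht
    rw [List.sum_cons]
    constructor
    · intro h0
      have ha0 : a = 0 := by omega
      have hts0 : t.sum = 0 := by omega
      intro x hx
      rcases List.mem_cons.mp hx with rfl | hx
      · exact ha0
      · exact (ih ht).mp hts0 x hx
    · intro h0
      have : t.sum = 0 := (ih ht).mpr (fun x hx => h0 x (by simp [hx]))
      have := h0 a (by simp)
      omega

lemma brute_true_iff (A : List Int) : isIdealPermutation_brute A = true ↔ pvNoFar A := by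
  simp only [isIdealPermutation_brute, PySem.List.foldl_ite_add_one, PySem.List.foldl_add,
    zero_add, beq_iff_eq]
  by_cases hn : A.length = 0
  · rw [hn]
    norm_num
    intro j hj
    exact absurd hj (by omega)
  · have h1 : (1:Int) ≤ (A.length : Int) := by omega
    set nI : Int := (A.length : Int) with hnI
    have hsing : PySem.List.pyRange (nI - 1) nI 1 = [nI - 1] := by
      have := PySem.List.pyRange_one_singleton (nI - 1)
      rwa [sub_add_cancel] at this
    have hsplitRange : PySem.List.pyRange 0 nI 1 =
        PySem.List.pyRange 0 (nI - 1) 1 ++ [nI - 1] := by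
      rw [PySem.List.pyRange_one_append 0 (nI - 1) nI (by omega) (by omega), hsing]
    rw [hsplitRange, List.map_append, List.sum_append]
    have hlast : PySem.List.pyRange (nI - 1 + 1) nI 1 = [] := by
      rw [sub_add_cancel]; exact PySem.List.pyRange_one_eq_nil (le_refl nI)
    rw [List.map_singleton, hlast]
    simp only [List.countP_nil, Nat.cast_zero, List.sum_singleton, add_zero]
    have hsplit : ∀ i ∈ PySem.List.pyRange 0 (nI - 1) 1,
        ((List.countP (fun j => decide (PySem.List.pyGetD A i 0 > PySem.List.pyGetD A j 0))
            (PySem.List.pyRange (i + 1) nI 1) : Nat) : Int) =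
        (if decide (PySem.List.pyGetD A i 0 > PySem.List.pyGetD A (i + 1) 0) = true then (1:Int) else 0) +
        ((List.countP (fun j => decide (PySem.List.pyGetD A i 0 > PySem.List.pyGetD A j 0))
            (PySem.List.pyRange (i + 2) nI 1) : Nat) : Int) := by
      intro i hi
      rw [PySem.List.mem_pyRange_one] at hi
      rw [PySem.List.pyRange_one_append (i + 1) (i + 2) nI (by omega) (by omega),
          List.countP_append, show i + 2 = i + 1 + 1 by ring,
          PySem.List.pyRange_one_singleton]
      by_cases h : PySem.List.pyGetD A i 0 > PySem.List.pyGetD A (i + 1) 0 <;> simp [h]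
    rw [List.map_congr_left hsplit, PySem.List.sum_map_add_int,
        PySem.List.sum_map_ite_one_zero]
    set F : Int := ((PySem.List.pyRange 0 (nI - 1) 1).map (fun i =>
        ((List.countP (fun j => decide (PySem.List.pyGetD A i 0 > PySem.List.pyGetD A j 0))
            (PySem.List.pyRange (i + 2) nI 1) : Nat) : Int))).sum with hF
    have hFn : ∀ x ∈ (PySem.List.pyRange 0 (nI - 1) 1).map (fun i =>
        ((List.countP (fun j => decide (PySem.List.pyGetD A i 0 > PySem.List.pyGetD A j 0))
            (PySem.List.pyRange (i + 2) nI 1) : Nat) : Int)), 0 ≤ x := by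
      intro x hx
      obtain ⟨i, _, rfl⟩ := List.mem_map.mp hx
      positivity
    constructor
    · intro heq j hj i hi h2
      have hF0 : F = 0 := by omega
      rw [hF, pv_sum_nonneg_zero_iff _ hFn] at hF0
      have hmemi : (i : Int) ∈ PySem.List.pyRange 0 (nI - 1) 1 := by
        rw [PySem.List.mem_pyRange_one]; omega
      have := hF0 _ (List.mem_map.mpr ⟨(i : Int), hmemi, rfl⟩)
      rw [Nat.cast_eq_zero, List.countP_eq_zero] at this
      have hmemj : (j : Int) ∈ PySem.List.pyRange ((i:Int) + 2) nI 1 := by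
        rw [PySem.List.mem_pyRange_one]; constructor <;> omega
      have := this _ hmemj
      simp only [PySem.List.pyGetD_natCast, decide_eq_true_eq] at this
      omega
    · intro hnf
      have hF0 : F = 0 := by
        rw [hF, pv_sum_nonneg_zero_iff _ hFn]
        intro x hx
        obtain ⟨i, hi, rfl⟩ := List.mem_map.mp hx
        rw [PySem.List.mem_pyRange_one] at hi
        rw [Nat.cast_eq_zero, List.countP_eq_zero]
        intro j hj
        rw [PySem.List.mem_pyRange_one] at hj
        have hi' : i = ((i.toNat : Nat) : Int) := by omega
        have hj' : j = ((j.toNat : Nat) : Int) := by omega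
        rw [hi', hj']
        simp only [PySem.List.pyGetD_natCast, decide_eq_true_eq]
        have := hnf j.toNat (by omega) i.toNat (by omega) (by omega)
        omega
      omega

lemma pvAltGo_true_iff (l : List (Int × Int)) (mx : Option Int) :
    pvAltGo mx l = true ↔
      ∀ k, (hk : k < l.length) →
        (∀ m0, mx = some m0 → m0 ≤ (l[k]).2) ∧
        ∀ i, (hi : i ≤ k) → (l[i]'(lt_of_le_of_lt hi hk)).1 ≤ (l[k]).2 := by
  induction l generalizing mx with
  | nil => simp [pvAltGo]
  | cons hd rest ih =>
    obtain ⟨v, w⟩ := hd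
    simp only [pvAltGo]
    set m : Int := match mx with | none => v | some m0 => if v > m0 then v else m0 with hm
    have hmle : ∀ x : Int, m ≤ x ↔ ((∀ m0, mx = some m0 → m0 ≤ x) ∧ v ≤ x) := by
      intro x
      cases mx with
      | none => simp [hm]
      | some m0 =>
        simp only [hm]
        constructor
        · intro h; split_ifs at h with hv
          · exact ⟨by intro a ha; cases ha; omega, h⟩
          · exact ⟨by intro a ha; cases ha; omega, by omega⟩
        · rintro ⟨h1, h2⟩; have := h1 m0 rfl; split_ifs <;> omega
    by_cases hmw : m > w
    · simp only [if_pos hmw]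
      constructor
      · intro h; exact absurd h (by simp)
      · intro h
        have h0 := h 0 (by simp)
        have : m ≤ w := by
          rw [hmle]
          exact ⟨fun m0 hm0 => h0.1 m0 hm0, h0.2 0 (le_refl 0)⟩
        omega
    · simp only [if_neg hmw, ih]
      constructor
      · intro h k hk
        cases k with
        | zero =>
          refine ⟨?_, ?_⟩
          · intro m0 hm0
            have : m ≤ w := by omega
            rw [hmle] at this; exact this.1 m0 hm0
          · intro i hi
            interval_cases i
            have : m ≤ w := by omega
            rw [hmle] at this
            simpa using this.2
        | succ k =>
          have hk' : k < rest.length := by simpa using hk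
          obtain ⟨h1, h2⟩ := h k hk'
          have hmk : m ≤ rest[k].2 := h1 m rfl
          rw [hmle] at hmk
          refine ⟨?_, ?_⟩
          · intro m0 hm0
            simpa using hmk.1 m0 hm0
          · intro i hi
            cases i with
            | zero => simpa using hmk.2
            | succ i => simpa using h2 i (by omega)
      · intro h k hk
        obtain ⟨h1, h2⟩ := h (k+1) (by simpa using hk)
        refine ⟨?_, ?_⟩
        · intro m0 hm0
          cases hm0
          rw [hmle]
          refine ⟨fun m0 hm0 => by simpa using h1 m0 hm0, ?_⟩
          simpa using h2 0 (by omega)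
        · intro i hi
          simpa using h2 (i+1) (by omega)

lemma alt_true_iff (A : List Int) :
    isIdealPermutation_brute_alt A = true ↔ pvNoFar A := by
  have hslice : PySem.List.slice A (some 2) none = A.drop 2 := by
    rw [PySem.List.slice_from A (show (0:Int) ≤ 2 by norm_num)]
    rfl
  rw [isIdealPermutation_brute_alt, hslice, pvAltGo_true_iff]
  have hlen : (A.zip (A.drop 2)).length = min A.length (A.length - 2) := by simp
  have hget : ∀ i, (hi : i + 2 < A.length) →
      (A.zip (A.drop 2))[i]'(by rw [hlen]; omega) = (A[i]'(by omega), A[i+2]'(hi)) := by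
    intro i hi
    rw [List.getElem_zip]
    congr 1
    rw [List.getElem_drop]
    congr 1
    omega
  have hgd : ∀ (idx : Nat) (h : idx < A.length), A.getD idx 0 = A[idx] :=
    fun idx h => List.getD_eq_getElem A 0 h
  constructor
  · intro hb j hj i hi h2
    have hk : j - 2 < (A.zip (A.drop 2)).length := by rw [hlen]; omega
    obtain ⟨_, h⟩ := hb (j-2) hk
    have := h i (by rw [hlen] at hk; omega)
    rw [hget i (by omega), hget (j-2) (by omega)] at this
    rw [hgd i hi, hgd j hj]
    have hjj : j - 2 + 2 = j := by omega
    simp only [hjj] at this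
    simpa using this
  · intro hnf k hk
    rw [hlen] at hk
    have hk2 : k + 2 < A.length := by omega
    refine ⟨by simp, ?_⟩
    intro i hi
    rw [hget k hk2, hget i (by omega)]
    have := hnf (k+2) hk2 i (by omega) (by omega)
    rw [hgd i (by omega), hgd (k+2) hk2] at this
    simpa using this

-- ===== VERDICT (by name: the statement is the Claim_ definition above) =====
theorem isIdealPermutation_brute_spec : Claim_equal_isIdealPermutation_brute := by
  intro A _
  unfold Spec_isIdealPermutation_brute
  have h1 := brute_true_iff A
  have h2 := alt_true_iff A
  cases hA : isIdealPermutation_brute A <;> cases hB : isIdealPermutation_brute_alt A <;> simp_all
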